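-- pv_equiv track=rewrite | github.com/knorth55/chainer-sort | chainer_sort/visualizations/vis_tracking_bbox.py | _default_cmap
-- ===== SOURCE A (Python) =====
-- def _default_cmap(label):
--     """Color map used in PASCAL VOC"""
--     r, g, b = 0, 0, 0
--     i = label
--     for j in range(8):
--         if i & (1 << 0):
--             r |= 1 << (7 - j)
--         if i & (1 << 1):
--             g |= 1 << (7 - j)
--         if i & (1 << 2):
--             b |= 1 << (7 - j)
--         i >>= 3
--     return r, g, b
-- ===== SOURCE B (Python) =====
-- def _rev8(m):
--     # reverse the 8 bits of a byte with a mask-and-shift swap network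
--     m = ((m >> 1) & 0x55) | ((m & 0x55) << 1)
--     m = ((m >> 2) & 0x33) | ((m & 0x33) << 2)
--     return ((m >> 4) & 0x0F) | ((m & 0x0F) << 4)
--
--
-- def _default_cmap(label):
--     """Color map used in PASCAL VOC"""
--     return tuple(
--         _rev8(sum(((label >> (3 * j + c)) & 1) << j for j in range(8)))
--         for c in range(3)
--     )
-- ===== Notes on version B (the rewrite author's own statement) =====
-- stated objective: alternative
-- what changed: Replaces the single loop that threads a mutated i >>= 3 accumulator and ORs each bit into position 7-j of three parallel channels with a two-stage algorithm: per channel, gather the bits LSB-first into a byte as a sum, then bit-reverse that byte with a branch-free mask-and-shift swap network (no reversed placement loop at all).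
import Mathlib
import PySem

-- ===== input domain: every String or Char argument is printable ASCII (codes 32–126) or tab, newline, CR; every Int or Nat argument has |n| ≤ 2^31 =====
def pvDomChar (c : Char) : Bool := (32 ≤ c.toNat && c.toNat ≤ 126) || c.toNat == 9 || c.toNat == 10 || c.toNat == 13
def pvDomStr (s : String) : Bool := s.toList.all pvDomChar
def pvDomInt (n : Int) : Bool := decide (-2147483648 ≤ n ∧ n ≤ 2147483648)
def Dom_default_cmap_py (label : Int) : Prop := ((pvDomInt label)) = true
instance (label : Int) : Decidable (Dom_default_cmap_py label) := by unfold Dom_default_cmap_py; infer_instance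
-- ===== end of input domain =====

-- B replaces A's single loop (parallel r,g,b accumulators with a mutated i >>= 3 and 7-j bit
-- placement) by a two-stage algorithm: gather each channel's bits LSB-first into a byte, then
-- reverse that byte with a branch-free mask-and-shift swap network (objective: alternative).

-- ===== PORT A =====
def default_cmap_py (label : Int) : Int × Int × Int :=
  -- r, g, b = 0, 0, 0 ; i = label ; for j in range(8): …  (state (r, g, b, i) threaded through the loop)
  let st := (List.range 8).foldl (fun (st : Int × Int × Int × Int) (j : Nat) =>
    let r := st.1; let g := st.2.1; let b := st.2.2.1; let i := st.2.2.2
    let r := if PySem.Int.band i ((1:Int) <<< (0:Nat)) ≠ 0 then PySem.Int.bor r ((1:Int) <<< (7-j)) else r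
    let g := if PySem.Int.band i ((1:Int) <<< (1:Nat)) ≠ 0 then PySem.Int.bor g ((1:Int) <<< (7-j)) else g
    let b := if PySem.Int.band i ((1:Int) <<< (2:Nat)) ≠ 0 then PySem.Int.bor b ((1:Int) <<< (7-j)) else b
    (r, g, b, i >>> (3:Nat))) (0, 0, 0, label)
  (st.1, st.2.1, st.2.2.1)

-- ===== PORT B =====
-- _rev8: reverse the 8 bits of a byte with three mask-and-shift swaps
def default_cmap_rev8 (m : Int) : Int :=
  let m := PySem.Int.bor (PySem.Int.band (m >>> (1:Nat)) 0x55) ((PySem.Int.band m 0x55) <<< (1:Nat))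
  let m := PySem.Int.bor (PySem.Int.band (m >>> (2:Nat)) 0x33) ((PySem.Int.band m 0x33) <<< (2:Nat))
  PySem.Int.bor (PySem.Int.band (m >>> (4:Nat)) 0x0F) ((PySem.Int.band m 0x0F) <<< (4:Nat))

-- sum(((label >> (3*j + c)) & 1) << j for j in range(8)): left fold of + from 0
def default_cmap_gather (label : Int) (c : Nat) : Int :=
  (List.range 8).foldl (fun (s : Int) (j : Nat) =>
    s + (PySem.Int.band (label >>> (3*j+c)) 1) <<< j) 0

def default_cmap_py_alt (label : Int) : Int × Int × Int :=
  (default_cmap_rev8 (default_cmap_gather label 0),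
   default_cmap_rev8 (default_cmap_gather label 1),
   default_cmap_rev8 (default_cmap_gather label 2))

-- ===== PRECONDITION & SPEC =====
def Spec_default_cmap_py (label : Int) (out : Int × Int × Int) : Prop := out = default_cmap_py_alt label
instance (label : Int) (out : Int × Int × Int) : Decidable (Spec_default_cmap_py label out) := by unfold Spec_default_cmap_py; infer_instance

-- ===== CLAIM (what is proved, stated in full; the proofs are below) =====
def Claim_equal_default_cmap_py : Prop := ∀ (label : Int), Dom_default_cmap_py label → Spec_default_cmap_py label (default_cmap_py label)

-- ===== LEMMAS AND PROOFS =====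

-- composing Python's arithmetic right shifts
theorem pv_sr_sr (x : Int) (m n : Nat) : (x >>> m) >>> n = x >>> (m+n) := by
  cases x
  · show Int.ofNat _ = Int.ofNat _ ; simp [Nat.shiftRight_add]
  · simp [Int.negSucc_shiftRight, Nat.shiftRight_add]

theorem pv_mod_two_eq (y : Int) : PySem.Int.mod y 2 = y % 2 := by
  simp [PySem.Int.mod, Int.fmod_eq_emod]

theorem pv_band_one_cases (y : Int) : PySem.Int.band y 1 = 0 ∨ PySem.Int.band y 1 = 1 := by
  rw [PySem.Int.band_one, pv_mod_two_eq]; omega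

theorem pv_nat_bit (m c : Nat) : (m >>> c) &&& 1 = (m.testBit c).toNat := by
  cases hm : m.testBit c with
  | false => simpa [Nat.testBit, Nat.and_comm] using hm
  | true =>
      have := hm
      simp [Nat.testBit] at this
      simpa [Nat.and_comm] using this

-- testing bit c of x equals testing bit 0 of x >> c (Python-exact, negatives included)
theorem pv_bit_shift (x : Int) (c : Nat) :
    (PySem.Int.band x ((1:Int) <<< c) = 0) ↔ (PySem.Int.band (x >>> c) 1 = 0) := by
  have h1 : ((1:Int) <<< c) = ((2^c : Nat) : Int) := by
    show Int.ofNat _ = _ ; simp [Nat.shiftLeft_eq]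
  have hpow : 0 < 2^c := Nat.two_pow_pos c
  cases x with
  | ofNat m =>
      rw [h1]
      show (PySem.Int.band ((m:Nat):Int) _ = 0) ↔ (PySem.Int.band (((m >>> c : Nat)):Int) 1 = 0)
      rw [PySem.Int.band_natCast, show ((1:Int)) = ((1:Nat):Int) from rfl, PySem.Int.band_natCast]
      rw [Nat.and_two_pow, pv_nat_bit]
      cases m.testBit c <;> simp
  | negSucc m =>
      rw [h1, Int.negSucc_shiftRight]
      simp only [PySem.Int.band]
      have hneg : ¬ (0 ≤ Int.negSucc m) := of_decide_eq_false rfl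
      have hneg2 : ¬ (0 ≤ Int.negSucc (m >>> c)) := of_decide_eq_false rfl
      rw [if_neg hneg, if_neg hneg2, if_pos (by positivity), if_pos (by norm_num)]
      have e1 : (-Int.negSucc m - 1) = ((m : Nat) : Int) := by rw [Int.negSucc_eq]; ring
      have e2 : (-Int.negSucc (m >>> c) - 1) = ((m >>> c : Nat) : Int) := by rw [Int.negSucc_eq]; ring
      rw [e1, e2, Int.toNat_natCast, Int.toNat_natCast, Int.toNat_natCast,
          show (Int.toNat 1) = 1 from rfl, Nat.and_comm (2^c) m, Nat.and_two_pow,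
          Nat.and_comm 1 _, pv_nat_bit]
      cases m.testBit c <;> simp

-- one conditional-set step of A written as extract-and-or of the shifted value
theorem pv_step (i r : Int) (c s : Nat) :
    (if PySem.Int.band i ((1:Int) <<< c) ≠ 0 then PySem.Int.bor r ((1:Int) <<< s) else r)
    = PySem.Int.bor r ((PySem.Int.band (i >>> c) 1) <<< s) := by
  rcases pv_band_one_cases (i >>> c) with h | h
  · rw [if_neg (by simpa [pv_bit_shift] using h), h]
    have h0 : ((0:Int) <<< s) = 0 := by show Int.ofNat _ = _ ; simp
    simp [h0]
  · rw [if_pos (by simp [Ne, pv_bit_shift, h]), h]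

-- B's reversal network applied to the LSB-first sum of 8 bits equals A's reversed OR placement
theorem pv_rev8 (b0 b1 b2 b3 b4 b5 b6 b7 : Int)
    (h0 : b0 = 0 ∨ b0 = 1) (h1 : b1 = 0 ∨ b1 = 1) (h2 : b2 = 0 ∨ b2 = 1)
    (h3 : b3 = 0 ∨ b3 = 1) (h4 : b4 = 0 ∨ b4 = 1) (h5 : b5 = 0 ∨ b5 = 1)
    (h6 : b6 = 0 ∨ b6 = 1) (h7 : b7 = 0 ∨ b7 = 1) :
    PySem.Int.bor (PySem.Int.bor (PySem.Int.bor (PySem.Int.bor (PySem.Int.bor (PySem.Int.bor (PySem.Int.bor (PySem.Int.bor 0 (b0 <<< (7:Nat))) (b1 <<< (6:Nat))) (b2 <<< (5:Nat))) (b3 <<< (4:Nat))) (b4 <<< (3:Nat))) (b5 <<< (2:Nat))) (b6 <<< (1:Nat))) b7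
    = default_cmap_rev8 (b0 + b1 <<< (1:Nat) + b2 <<< (2:Nat) + b3 <<< (3:Nat) + b4 <<< (4:Nat) + b5 <<< (5:Nat) + b6 <<< (6:Nat) + b7 <<< (7:Nat)) := by
  rcases h0 with h0|h0 <;> rcases h1 with h1|h1 <;> rcases h2 with h2|h2 <;>
  rcases h3 with h3|h3 <;> rcases h4 with h4|h4 <;> rcases h5 with h5|h5 <;>
  rcases h6 with h6|h6 <;> rcases h7 with h7|h7 <;> subst h0 h1 h2 h3 h4 h5 h6 h7 <;> decide

theorem pv_main (label : Int) : default_cmap_py label = default_cmap_py_alt label := by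
  simp only [default_cmap_py, default_cmap_py_alt, default_cmap_gather, List.range_succ,
    List.foldl_append, List.foldl_cons, List.foldl_nil, List.range_zero, pv_step, pv_sr_sr]
  norm_num [Prod.ext_iff]
  refine ⟨?_, ?_, ?_⟩ <;>
    exact pv_rev8 _ _ _ _ _ _ _ _ (pv_band_one_cases _) (pv_band_one_cases _)
      (pv_band_one_cases _) (pv_band_one_cases _) (pv_band_one_cases _)
      (pv_band_one_cases _) (pv_band_one_cases _) (pv_band_one_cases _)

-- ===== VERDICT (by name: the statement is the Claim_ definition above) =====
theorem default_cmap_py_spec : Claim_equal_default_cmap_py := by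
  intro label _
  unfold Spec_default_cmap_py
  exact pv_main label
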